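-- pv_equiv track=rewrite | github.com/ayush286/AlgoExpert | SameBsts.py | getRangeIndexesRootPlus
-- ===== SOURCE A (Python) =====
-- def getRangeIndexesRootPlus(array):
-- 	rangeIndexes = [0]
-- 	currentGreatest = array[0]
-- 	for index in range(1, len(array)):
-- 		if array[index] > currentGreatest:
-- 			rangeIndexes.append(index)
-- 			currentGreatest = array[index]
-- 	return rangeIndexes
-- ===== SOURCE B (Python) =====
-- def getRangeIndexesRootPlus(array):
--     # Build the running-maximum table first, then scan it for strict increases.
--     prefix = []
--     m = None
--     for x in array:
--         m = x if m is None or x > m else m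
--         prefix.append(m)
--     rangeIndexes = [0]
--     for i, (prev, cur) in enumerate(zip(prefix, prefix[1:]), 1):
--         if cur > prev:
--             rangeIndexes.append(i)
--     return rangeIndexes
-- ===== Notes on version B (the rewrite author's own statement) =====
-- stated objective: alternative
-- what changed: Replaces A's single interleaved loop carrying a current-maximum variable with a two-phase decomposition: build the running-maximum table in one pass, then a pairwise delta-scan (enumerate over zip of the table with its tail) collecting the indices of strict increases.
import Mathlib
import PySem

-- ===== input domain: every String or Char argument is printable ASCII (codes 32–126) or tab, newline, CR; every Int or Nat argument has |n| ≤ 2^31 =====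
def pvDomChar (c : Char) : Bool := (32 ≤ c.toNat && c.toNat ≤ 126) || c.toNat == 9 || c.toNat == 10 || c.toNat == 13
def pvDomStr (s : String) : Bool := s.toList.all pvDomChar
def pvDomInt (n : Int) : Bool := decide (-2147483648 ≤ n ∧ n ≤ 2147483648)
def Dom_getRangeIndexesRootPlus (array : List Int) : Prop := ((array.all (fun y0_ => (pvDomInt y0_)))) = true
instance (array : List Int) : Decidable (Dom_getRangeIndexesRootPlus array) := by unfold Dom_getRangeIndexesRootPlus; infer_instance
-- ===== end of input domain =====

-- B changes the decomposition (running-maximum table + pairwise delta-scan) instead of A's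
-- interleaved single loop; equivalence is proved on nonempty arrays (A raises IndexError on []).

-- ===== PORT A =====
def getRangeIndexesRootPlus (array : List Int) : List Int :=
  match array with
  | [] => []  -- Python raises IndexError at array[0]; excluded by Pre_
  | a0 :: _ =>
    ((PySem.List.pyRange 1 (array.length : Int) 1).foldl
      (fun (s : List Int × Int) index =>
        if PySem.List.pyGetD array index 0 > s.2
        then (s.1 ++ [index], PySem.List.pyGetD array index 0)
        else s)
      ([0], a0)).1

-- ===== PORT B =====
-- first pass of Source B: build the running-maximum table (m starts as None)
def pvPrefixLoop (array : List Int) : List Int × Option Int :=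
  array.foldl
    (fun (s : List Int × Option Int) x =>
      let m : Int := match s.2 with
        | none => x
        | some m0 => if x > m0 then x else m0
      (s.1 ++ [m], some m))
    ([], none)

def getRangeIndexesRootPlus_alt (array : List Int) : List Int :=
  let pfx := (pvPrefixLoop array).1
  (PySem.List.enumerate (pfx.zip (PySem.List.slice pfx (some 1) none)) 1).foldl
    (fun (acc : List Int) p =>
      if p.2.2 > p.2.1 then acc ++ [p.1] else acc)
    [0]

-- ===== PRECONDITION & SPEC =====
-- A indexes array[0] unconditionally, so it raises IndexError on the empty list; Pre_ excludes exactly that.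
def Pre_getRangeIndexesRootPlus (array : List Int) : Prop := array ≠ []
instance (array : List Int) : Decidable (Pre_getRangeIndexesRootPlus array) := by
  unfold Pre_getRangeIndexesRootPlus; infer_instance

def pvWitness_getRangeIndexesRootPlus : List Int := [3, 1, 4, 4, 5]

def Spec_getRangeIndexesRootPlus (array : List Int) (out : List Int) : Prop :=
  out = getRangeIndexesRootPlus_alt array
instance (array : List Int) (out : List Int) : Decidable (Spec_getRangeIndexesRootPlus array out) := by
  unfold Spec_getRangeIndexesRootPlus; infer_instance

-- ===== CLAIM (what is proved, stated in full; the proofs are below) =====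
def Claim_equal_getRangeIndexesRootPlus : Prop :=
  ∀ (array : List Int), Dom_getRangeIndexesRootPlus array →
    Pre_getRangeIndexesRootPlus array →
    Spec_getRangeIndexesRootPlus array (getRangeIndexesRootPlus array)

-- ===== LEMMAS AND PROOFS =====

-- reference recursion: indices (from i) where the element beats the running maximum g
def pvStep : List Int → Int → Int → List Int
  | [], _, _ => []
  | x :: t, i, g => if x > g then i :: pvStep t (i + 1) x else pvStep t (i + 1) g

-- running-maximum list of t with seed g
def pvPmax : List Int → Int → List Int
  | [], _ => []
  | x :: t, g => let m := if x > g then x else g; m :: pvPmax t m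

-- final maximum
def pvLastMax : List Int → Int → Int
  | [], g => g
  | x :: t, g => pvLastMax t (if x > g then x else g)

theorem pvPrefix_inv (t : List Int) : ∀ (acc : List Int) (g : Int),
    t.foldl
      (fun (s : List Int × Option Int) x =>
        let m : Int := match s.2 with
          | none => x
          | some m0 => if x > m0 then x else m0
        (s.1 ++ [m], some m))
      (acc, some g)
    = (acc ++ pvPmax t g, some (pvLastMax t g)) := by
  induction t with
  | nil => intro acc g; simp [pvPmax, pvLastMax]
  | cons x t ih =>
    intro acc g
    simp only [List.foldl_cons, pvPmax, pvLastMax]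
    rw [ih]
    simp

theorem pvPrefixLoop_cons (a0 : Int) (t : List Int) :
    (pvPrefixLoop (a0 :: t)).1 = a0 :: pvPmax t a0 := by
  unfold pvPrefixLoop
  simp only [List.foldl_cons]
  rw [pvPrefix_inv]
  simp

-- A's foldl over range(k, k + len t) on pre ++ t computes pvStep
theorem pvA_inv (t : List Int) : ∀ (pre acc : List Int) (g : Int),
    ((PySem.List.pyRange (pre.length : Int) ((pre.length : Int) + (t.length : Int)) 1).foldl
      (fun (s : List Int × Int) index =>
        if PySem.List.pyGetD (pre ++ t) index 0 > s.2
        then (s.1 ++ [index], PySem.List.pyGetD (pre ++ t) index 0)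
        else s)
      (acc, g)).1
    = acc ++ pvStep t (pre.length : Int) g := by
  induction t with
  | nil =>
    intro pre acc g
    rw [PySem.List.pyRange_one_eq_nil (by simp)]
    simp [pvStep]
  | cons x t ih =>
    intro pre acc g
    have hcons : PySem.List.pyRange (pre.length : Int) ((pre.length : Int) + ((x :: t).length : Int)) 1
        = (pre.length : Int) :: PySem.List.pyRange ((pre.length : Int) + 1) ((pre.length : Int) + ((x :: t).length : Int)) 1 := by
      apply PySem.List.pyRange_one_cons
      simp
    rw [hcons]
    have hget : PySem.List.pyGetD (pre ++ x :: t) (pre.length : Int) 0 = x := by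
      rw [PySem.List.pyGetD_eq_getElem (pre ++ x :: t) 0 (Int.natCast_nonneg _)
        (by simp only [List.length_append, List.length_cons]; push_cast; omega)]
      simp
    have hsplit : pre ++ x :: t = (pre ++ [x]) ++ t := by simp
    have hlen : ((pre ++ [x]).length : Int) = (pre.length : Int) + 1 := by simp
    simp only [List.foldl_cons, hget]
    by_cases hx : x > g
    · rw [if_pos hx]
      have := ih (pre ++ [x]) (acc ++ [(pre.length : Int)]) x
      rw [hsplit]
      rw [hlen] at this
      have hlen2 : ((pre.length : Int) + ((x :: t).length : Int)) = ((pre.length : Int) + 1 + (t.length : Int)) := by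
        simp; omega
      rw [hlen2, this]
      simp [pvStep, hx]
    · rw [if_neg hx]
      have := ih (pre ++ [x]) acc g
      rw [hsplit]
      rw [hlen] at this
      have hlen2 : ((pre.length : Int) + ((x :: t).length : Int)) = ((pre.length : Int) + 1 + (t.length : Int)) := by
        simp; omega
      rw [hlen2, this]
      simp [pvStep, hx]

theorem pvA_cons (a0 : Int) (t : List Int) :
    getRangeIndexesRootPlus (a0 :: t) = [0] ++ pvStep t 1 a0 := by
  show (((PySem.List.pyRange 1 ((a0 :: t).length : Int) 1).foldl
      (fun (s : List Int × Int) index =>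
        if PySem.List.pyGetD (a0 :: t) index 0 > s.2
        then (s.1 ++ [index], PySem.List.pyGetD (a0 :: t) index 0)
        else s)
      ([0], a0)).1) = [0] ++ pvStep t 1 a0
  have h := pvA_inv t [a0] [0] a0
  simp only [List.length_cons, List.singleton_append] at h ⊢
  have hlen : ((t.length + 1 : Nat) : Int) = ((1 : Nat) : Int) + (t.length : Int) := by push_cast; ring
  rw [hlen]
  exact h

-- B's delta-scan over the running maxima computes pvStep too
theorem pvB_scan (t : List Int) : ∀ (g : Int) (i : Int) (acc : List Int),
    (PySem.List.enumerate ((g :: pvPmax t g).zip (pvPmax t g)) i).foldl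
      (fun (acc : List Int) p =>
        if p.2.2 > p.2.1 then acc ++ [p.1] else acc)
      acc
    = acc ++ pvStep t i g := by
  induction t with
  | nil => intro g i acc; simp [pvPmax, pvStep, PySem.List.enumerate_nil]
  | cons x t ih =>
    intro g i acc
    simp only [pvPmax, pvStep]
    by_cases hx : x > g
    · simp only [if_pos hx, List.zip_cons_cons, PySem.List.enumerate_cons, List.foldl_cons]
      rw [ih x (i + 1) (acc ++ [i])]
      simp
    · simp only [if_neg hx, List.zip_cons_cons, PySem.List.enumerate_cons, List.foldl_cons]
      rw [if_neg (lt_irrefl g)]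
      exact ih g (i + 1) acc

theorem pvB_cons (a0 : Int) (t : List Int) :
    getRangeIndexesRootPlus_alt (a0 :: t) = [0] ++ pvStep t 1 a0 := by
  simp only [getRangeIndexesRootPlus_alt, pvPrefixLoop_cons, PySem.List.slice_from_one,
    List.tail_cons]
  exact pvB_scan t a0 1 [0]

-- ===== VERDICT (by name: the statement is the Claim_ definition above) =====
theorem getRangeIndexesRootPlus_spec : Claim_equal_getRangeIndexesRootPlus := by
  intro array _ hpre
  unfold Spec_getRangeIndexesRootPlus
  match array with
  | [] => exact absurd rfl hpre
  | a0 :: t => rw [pvA_cons, pvB_cons]
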